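-- pv_equiv track=rewrite | github.com/pypi-data/pypi-mirror-403 | packages/crunch-synth/crunch_synth-0.7.1-py3-none-any.whl/crunch_synth/utils/evaluation_utils.py | count_evaluations
-- ===== SOURCE A (Python) =====
-- def count_evaluations(history_price, horizon, interval):
--     ts_values = [ts for ts, _ in history_price]
--     count = 0
--     prev_ts = ts_values[0]
--     for ts in ts_values[1:]:
--         if ts - prev_ts >= interval:
--             if ts - ts_values[0] >= horizon:
--                 count += 1
--             prev_ts = ts
--     return count
-- ===== SOURCE B (Python) =====
-- def count_evaluations(history_price, horizon, interval):
--     # Recursive jump-search: each call scans forward for the NEXT retained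
--     # timestamp (first one >= interval past the current anchor), scores it
--     # against the horizon, and recurses on the tail after it.
--     first = history_price[0][0]
--
--     def go(anchor, rest):
--         for k in range(len(rest)):
--             ts = rest[k][0]
--             if ts - anchor >= interval:
--                 return (1 if ts - first >= horizon else 0) + go(ts, rest[k + 1:])
--         return 0
--
--     return go(first, history_price[1:])
-- ===== Notes on version B (the rewrite author's own statement) =====
-- stated objective: alternative
-- what changed: B replaces A's single stateful element-by-element sweep with recursion on the retained timestamps: each call performs an inner forward search for the next timestamp >= interval past the current anchor, scores it against the horizon, and recurses on the remaining slice.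
import Mathlib
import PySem

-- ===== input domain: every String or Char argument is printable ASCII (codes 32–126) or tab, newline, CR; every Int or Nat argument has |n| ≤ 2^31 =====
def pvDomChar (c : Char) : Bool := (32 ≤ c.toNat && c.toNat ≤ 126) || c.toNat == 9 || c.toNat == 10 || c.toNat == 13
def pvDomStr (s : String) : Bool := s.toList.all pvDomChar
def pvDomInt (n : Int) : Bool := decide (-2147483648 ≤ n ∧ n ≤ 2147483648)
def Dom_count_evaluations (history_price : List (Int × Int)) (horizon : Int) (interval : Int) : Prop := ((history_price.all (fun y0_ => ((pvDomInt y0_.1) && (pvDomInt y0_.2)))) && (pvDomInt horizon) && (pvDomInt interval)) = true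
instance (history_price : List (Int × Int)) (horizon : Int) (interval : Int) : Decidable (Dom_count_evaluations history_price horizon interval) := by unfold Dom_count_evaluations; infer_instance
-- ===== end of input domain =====

-- B replaces A's single stateful sweep by recursion on the retained timestamps
-- (inner search for the next retained one, then recurse); alternative decomposition, same cost.

-- ===== PORT A =====
-- A: single fold keeping (count, prev_ts); the [] case is excluded by Pre_ (A raises IndexError).
def count_evaluations (history_price : List (Int × Int)) (horizon : Int) (interval : Int) : Int :=
  match history_price.map Prod.fst with
  | [] => 0
  | t0 :: rest =>
    (rest.foldl (fun (st : Int × Int) ts =>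
      if ts - st.2 ≥ interval then
        (if ts - t0 ≥ horizon then st.1 + 1 else st.1, ts)
      else st) (0, t0)).1

-- ===== PORT B =====
-- Source B's inner for-loop: search for the first timestamp ≥ interval past the anchor,
-- returning it together with the remaining slice rest[k+1:].
def pvFindNext (interval anchor : Int) : List (Int × Int) → Option (Int × List (Int × Int))
  | [] => none
  | (ts, _) :: rest =>
    if ts - anchor ≥ interval then some (ts, rest) else pvFindNext interval anchor rest

theorem pvFindNext_length {interval anchor : Int} :
    ∀ {l : List (Int × Int)} {ts : Int} {rest' : List (Int × Int)},
      pvFindNext interval anchor l = some (ts, rest') → rest'.length < l.length := by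
  intro l
  induction l with
  | nil => intro ts rest' h; simp [pvFindNext] at h
  | cons p r ih =>
    intro ts rest' h
    by_cases hc : p.1 - anchor ≥ interval
    · simp [pvFindNext, hc] at h
      simp [h.2.symm]
    · simp [pvFindNext, hc] at h
      exact Nat.lt_succ_of_lt (ih h)

-- Source B's recursive go: score the next retained timestamp and recurse past it.
def pvGo (first horizon interval anchor : Int) (rest : List (Int × Int)) : Int :=
  match h : pvFindNext interval anchor rest with
  | none => 0
  | some (ts, rest') =>
    (if ts - first ≥ horizon then 1 else 0) + pvGo first horizon interval ts rest'
termination_by rest.length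
decreasing_by exact pvFindNext_length h

def count_evaluations_alt (history_price : List (Int × Int)) (horizon : Int) (interval : Int) : Int :=
  match history_price with
  | [] => 0
  | (t0, _) :: rest => pvGo t0 horizon interval t0 rest

-- ===== PRECONDITION & SPEC =====
-- Pre_ excludes the empty history, on which A (and B) raise IndexError at history_price[0].
def Pre_count_evaluations (history_price : List (Int × Int)) (horizon : Int) (interval : Int) : Prop :=
  history_price ≠ []
instance (history_price : List (Int × Int)) (horizon : Int) (interval : Int) : Decidable (Pre_count_evaluations history_price horizon interval) := by unfold Pre_count_evaluations; infer_instance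
def pvWitness_count_evaluations : (List (Int × Int)) × Int × Int := ([(0, 0), (5, 1)], 3, 2)

def Spec_count_evaluations (history_price : List (Int × Int)) (horizon : Int) (interval : Int) (out : Int) : Prop := out = count_evaluations_alt history_price horizon interval
instance (history_price : List (Int × Int)) (horizon : Int) (interval : Int) (out : Int) : Decidable (Spec_count_evaluations history_price horizon interval out) := by unfold Spec_count_evaluations; infer_instance

-- ===== CLAIM (what is proved, stated in full; the proofs are below) =====
def Claim_equal_count_evaluations : Prop := ∀ (history_price : List (Int × Int)) (horizon : Int) (interval : Int), Dom_count_evaluations history_price horizon interval → Pre_count_evaluations history_price horizon interval → Spec_count_evaluations history_price horizon interval (count_evaluations history_price horizon interval)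

-- ===== LEMMAS AND PROOFS =====

theorem pvGo_skip (first horizon interval anchor ts p : Int) (r : List (Int × Int))
    (h : ¬ ts - anchor ≥ interval) :
    pvGo first horizon interval anchor ((ts, p) :: r) = pvGo first horizon interval anchor r := by
  rw [pvGo, pvGo]
  simp only [pvFindNext]
  rw [if_neg h]

theorem pvGo_take (first horizon interval anchor ts p : Int) (r : List (Int × Int))
    (h : ts - anchor ≥ interval) :
    pvGo first horizon interval anchor ((ts, p) :: r)
      = (if ts - first ≥ horizon then 1 else 0) + pvGo first horizon interval ts r := by
  rw [pvGo]
  simp only [pvFindNext]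
  rw [if_pos h]

theorem foldA_eq_go (t0 horizon interval : Int) :
    ∀ (rest : List (Int × Int)) (c a : Int),
      ((rest.map Prod.fst).foldl (fun (st : Int × Int) ts =>
        if ts - st.2 ≥ interval then
          (if ts - t0 ≥ horizon then st.1 + 1 else st.1, ts)
        else st) (c, a)).1
      = c + pvGo t0 horizon interval a rest := by
  intro rest
  induction rest with
  | nil =>
    intro c a
    rw [pvGo]
    simp [pvFindNext]
  | cons q r ih =>
    intro c a
    obtain ⟨ts, p⟩ := q
    by_cases h : ts - a ≥ interval
    · rw [pvGo_take t0 horizon interval a ts p r h]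
      by_cases hp : ts - t0 ≥ horizon
      · simp [List.foldl, h, hp, ih]; ring
      · simp [List.foldl, h, hp, ih]
    · rw [pvGo_skip t0 horizon interval a ts p r h]
      simp [List.foldl, h, ih]

-- ===== VERDICT (by name: the statement is the Claim_ definition above) =====
theorem count_evaluations_spec : Claim_equal_count_evaluations := by
  intro hp horizon interval _ hpre
  unfold Spec_count_evaluations count_evaluations count_evaluations_alt
  cases hp with
  | nil => exact absurd rfl hpre
  | cons q ps =>
    obtain ⟨t0, p0⟩ := q
    simp only [List.map_cons]
    rw [foldA_eq_go]
    simp
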